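-- pv_equiv track=rewrite | github.com/paraggundal96/DSA-150 | commonInArray.py | isCommon
-- ===== SOURCE A (Python) =====
-- from typing import List
--
-- def isCommon(arr1: List[str], arr2: List[str]) -> bool:
--     dict = {}
--     if len(arr1) == 0 or len(arr2) == 0:  # have a look here
--         return False
--     for elements in arr1:
--         dict.update({elements.lower():False})
--     for elements in arr2:
--         if elements.lower() in dict.keys():
--             return True
--     return False
-- ===== SOURCE B (Python) =====
-- from typing import List
--
-- def isCommon(arr1: List[str], arr2: List[str]) -> bool:
--     s1 = sorted(x.lower() for x in arr1)
--     s2 = sorted(y.lower() for y in arr2)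
--     i = j = 0
--     while i < len(s1) and j < len(s2):
--         if s1[i] == s2[j]:
--             return True
--         if s1[i] < s2[j]:
--             i += 1
--         else:
--             j += 1
--     return False
-- ===== Notes on version B (the rewrite author's own statement) =====
-- stated objective: alternative
-- what changed: Replaces the hash-table build-and-probe with sorting both lowercased lists and a two-pointer ordered merge that stops at the first equal pair.
import Mathlib
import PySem

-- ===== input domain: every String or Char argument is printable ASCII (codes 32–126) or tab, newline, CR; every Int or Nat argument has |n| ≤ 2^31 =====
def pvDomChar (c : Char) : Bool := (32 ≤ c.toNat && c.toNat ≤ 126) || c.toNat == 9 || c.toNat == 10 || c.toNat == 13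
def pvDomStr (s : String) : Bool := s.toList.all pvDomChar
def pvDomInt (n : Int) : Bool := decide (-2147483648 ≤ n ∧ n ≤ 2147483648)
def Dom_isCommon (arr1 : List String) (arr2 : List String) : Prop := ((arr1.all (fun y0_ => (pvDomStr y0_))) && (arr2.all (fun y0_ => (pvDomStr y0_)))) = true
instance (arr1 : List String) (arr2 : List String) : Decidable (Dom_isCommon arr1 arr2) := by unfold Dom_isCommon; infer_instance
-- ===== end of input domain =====

-- B replaces A's hash-table build-and-probe with sorting both lowercased lists and a
-- two-pointer ordered merge (objective: alternative algorithm, similar cost).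

-- ===== PORT A =====
def isCommon (arr1 : List String) (arr2 : List String) : Bool :=
  if arr1.length = 0 || arr2.length = 0 then false
  else
    let d : PySem.Dict String Bool :=
      arr1.foldl (fun d e => d.insert (PySem.Str.lower e) false) PySem.Dict.empty
    -- for-loop with early 'return True' = any
    arr2.any (fun e => decide (PySem.Str.lower e ∈ d.keys))

-- ===== PORT B =====
-- two-pointer merge over the sorted lists (B's while loop as structural recursion on the suffixes)
def pvMerge : List String → List String → Bool
  | [], _ => false
  | _ :: _, [] => false
  | a :: as, b :: bs =>
    if a = b then true
    else if a < b then pvMerge as (b :: bs)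
    else pvMerge (a :: as) bs

def isCommon_alt (arr1 : List String) (arr2 : List String) : Bool :=
  pvMerge (PySem.List.sorted (arr1.map PySem.Str.lower) (fun x => x) false)
          (PySem.List.sorted (arr2.map PySem.Str.lower) (fun x => x) false)

-- ===== PRECONDITION & SPEC =====
def Spec_isCommon (arr1 : List String) (arr2 : List String) (out : Bool) : Prop := out = isCommon_alt arr1 arr2
instance (arr1 : List String) (arr2 : List String) (out : Bool) : Decidable (Spec_isCommon arr1 arr2 out) := by unfold Spec_isCommon; infer_instance

-- ===== CLAIM (what is proved, stated in full; the proofs are below) =====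
def Claim_equal_isCommon : Prop := ∀ (arr1 : List String) (arr2 : List String), Dom_isCommon arr1 arr2 → Spec_isCommon arr1 arr2 (isCommon arr1 arr2)

-- ===== LEMMAS AND PROOFS =====

theorem pvMerge_nil_right (s1 : List String) : pvMerge s1 [] = false := by
  cases s1 <;> simp [pvMerge]

-- the two-pointer merge on two sorted lists decides whether they share an element
theorem pvMerge_iff (s1 s2 : List String)
    (h1 : s1.Pairwise (· ≤ ·)) (h2 : s2.Pairwise (· ≤ ·)) :
    pvMerge s1 s2 = true ↔ ∃ x, x ∈ s1 ∧ x ∈ s2 := by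
  revert h1 h2
  induction s1, s2 using pvMerge.induct with
  | case1 s2 => simp [pvMerge]
  | case2 a as => simp [pvMerge]
  | case3 as b bs =>
    intro _ _
    constructor
    · intro _; exact ⟨b, List.mem_cons_self, List.mem_cons_self⟩
    · intro _; rw [pvMerge]; simp
  | case4 a as b bs hne hlt ih =>
    intro h1 h2
    rw [List.pairwise_cons] at h1
    have ih' := ih h1.2 h2
    simp only [pvMerge, if_neg hne, if_pos hlt]
    rw [ih']
    constructor
    · rintro ⟨x, hx1, hx2⟩; exact ⟨x, List.mem_cons_of_mem _ hx1, hx2⟩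
    · rintro ⟨x, hx1, hx2⟩
      rcases List.mem_cons.1 hx1 with rfl | hx1'
      · rcases List.mem_cons.1 hx2 with rfl | hx2'
        · exact absurd rfl hne
        · have hb := (List.pairwise_cons.1 h2).1 x hx2'
          exact absurd (lt_of_lt_of_le hlt hb) (lt_irrefl x)
      · exact ⟨x, hx1', hx2⟩
  | case5 a as b bs hne hnlt ih =>
    intro h1 h2
    rw [List.pairwise_cons] at h2
    have ih' := ih h1 h2.2
    simp only [pvMerge, if_neg hne, if_neg hnlt]
    rw [ih']
    have hba : b < a := lt_of_le_of_ne (not_lt.1 hnlt) (fun h => hne h.symm)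
    constructor
    · rintro ⟨x, hx1, hx2⟩; exact ⟨x, hx1, List.mem_cons_of_mem _ hx2⟩
    · rintro ⟨x, hx1, hx2⟩
      rcases List.mem_cons.1 hx2 with rfl | hx2'
      · rcases List.mem_cons.1 hx1 with rfl | hx1'
        · exact absurd rfl hne
        · have ha := (List.pairwise_cons.1 h1).1 x hx1'
          exact absurd (lt_of_lt_of_le hba ha) (lt_irrefl x)
      · exact ⟨x, hx1, hx2'⟩

theorem alt_iff (arr1 arr2 : List String) :
    isCommon_alt arr1 arr2 = true ↔
      ∃ x, x ∈ arr1.map PySem.Str.lower ∧ x ∈ arr2.map PySem.Str.lower := by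
  unfold isCommon_alt
  rw [pvMerge_iff _ _ (PySem.List.sorted_pairwise _ _) (PySem.List.sorted_pairwise _ _)]
  simp [PySem.List.mem_sorted]

theorem a_iff (arr1 arr2 : List String) (h1 : arr1 ≠ []) (h2 : arr2 ≠ []) :
    isCommon arr1 arr2 = true ↔
      ∃ x, x ∈ arr1.map PySem.Str.lower ∧ x ∈ arr2.map PySem.Str.lower := by
  unfold isCommon
  rw [if_neg (by simp [h1, h2])]
  simp only [PySem.Dict.keys_foldl_insert_key, List.any_eq_true, decide_eq_true_eq,
    PySem.Set.mem_update, PySem.Dict.keys_empty, List.not_mem_nil, false_or, List.mem_map]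
  constructor
  · rintro ⟨e, he, x, hx, hxe⟩
    exact ⟨PySem.Str.lower e, ⟨x, hx, hxe⟩, ⟨e, he, rfl⟩⟩
  · rintro ⟨y, hy1, e, he, rfl⟩
    rcases hy1 with ⟨x, hx, hxe⟩
    exact ⟨e, he, x, hx, hxe⟩

-- ===== VERDICT (by name: the statement is the Claim_ definition above) =====
theorem isCommon_spec : Claim_equal_isCommon := by
  unfold Claim_equal_isCommon Spec_isCommon
  intro arr1 arr2 _
  by_cases ha : arr1 = []
  · subst ha
    simp [isCommon, isCommon_alt, pvMerge, PySem.List.sorted]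
  · by_cases hb : arr2 = []
    · subst hb
      have hnil : (PySem.List.sorted ([] : List String) (fun x => x)) = [] := rfl
      simp [isCommon, isCommon_alt, hnil, pvMerge_nil_right, ha]
    · rw [Bool.eq_iff_iff, a_iff arr1 arr2 ha hb, alt_iff]
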